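-- pv_equiv track=rewrite | github.com/jiwonkimpark/circ-alpaca | alpaca/signature/convert_field_space.py | bits_to_field_space
-- ===== SOURCE A (Python) =====
-- def bits_to_field_space(input_bits, modulus):
--     mult = 1 % modulus
--     val = 0 % modulus
--
--     for bit in input_bits:
--         if bit:
--             val += mult
--             val %= modulus
--
--         mult = (mult + mult) % modulus
--
--     return val
-- ===== SOURCE B (Python) =====
-- def bits_to_field_space(input_bits, modulus):
--     # Horner's rule over the bits from most-significant (last) to least-significant (first).
--     val = 0 % modulus
--     for bit in reversed(list(input_bits)):
--         val = (val * 2 + (1 if bit else 0)) % modulus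
--     return val
-- ===== Notes on version B (the rewrite author's own statement) =====
-- stated objective: alternative
-- what changed: Replaces the running power-of-two multiplier with Horner's rule: a single accumulator is doubled (mod modulus) while iterating the bits in reverse, so no 'mult' state is kept.
import Mathlib
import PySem

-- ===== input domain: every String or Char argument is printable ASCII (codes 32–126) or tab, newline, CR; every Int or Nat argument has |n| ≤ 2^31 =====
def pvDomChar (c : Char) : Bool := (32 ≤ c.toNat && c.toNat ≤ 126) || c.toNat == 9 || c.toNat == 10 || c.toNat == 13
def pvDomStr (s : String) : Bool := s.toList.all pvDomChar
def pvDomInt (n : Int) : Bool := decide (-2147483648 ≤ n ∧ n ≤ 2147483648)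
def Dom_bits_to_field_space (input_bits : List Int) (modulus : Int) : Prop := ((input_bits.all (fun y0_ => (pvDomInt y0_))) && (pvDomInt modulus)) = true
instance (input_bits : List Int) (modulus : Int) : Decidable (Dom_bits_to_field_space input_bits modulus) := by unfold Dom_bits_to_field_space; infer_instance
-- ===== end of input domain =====

-- B replaces A's running power-of-two multiplier with Horner's rule over the reversed bit list; objective: alternative decomposition.


-- ===== PORT A =====
-- state (mult, val), loop over input_bits
def bits_to_field_space (input_bits : List Int) (modulus : Int) : Int :=
  (input_bits.foldl
    (fun st bit =>
      (PySem.Int.mod (st.1 + st.1) modulus,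
       if bit ≠ 0 then PySem.Int.mod (st.2 + st.1) modulus else st.2))
    (PySem.Int.mod 1 modulus, PySem.Int.mod 0 modulus)).2

-- ===== PORT B =====
-- Horner's rule: single accumulator, bits processed in reverse
def bits_to_field_space_alt (input_bits : List Int) (modulus : Int) : Int :=
  input_bits.reverse.foldl
    (fun val bit => PySem.Int.mod (val * 2 + (if bit ≠ 0 then 1 else 0)) modulus)
    (PySem.Int.mod 0 modulus)

-- ===== PRECONDITION & SPEC =====
-- Python raises ZeroDivisionError when modulus = 0 (already at '1 % modulus'), so that input is excluded.
def Pre_bits_to_field_space (input_bits : List Int) (modulus : Int) : Prop := modulus ≠ 0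
instance (input_bits : List Int) (modulus : Int) : Decidable (Pre_bits_to_field_space input_bits modulus) := by unfold Pre_bits_to_field_space; infer_instance
def pvWitness_bits_to_field_space : List Int × Int := ([1, 0, 1], 7)

def Spec_bits_to_field_space (input_bits : List Int) (modulus : Int) (out : Int) : Prop := out = bits_to_field_space_alt input_bits modulus
instance (input_bits : List Int) (modulus : Int) (out : Int) : Decidable (Spec_bits_to_field_space input_bits modulus out) := by unfold Spec_bits_to_field_space; infer_instance

-- ===== CLAIM (what is proved, stated in full; the proofs are below) =====
def Claim_equal_bits_to_field_space : Prop := ∀ (input_bits : List Int) (modulus : Int), Dom_bits_to_field_space input_bits modulus → Pre_bits_to_field_space input_bits modulus → Spec_bits_to_field_space input_bits modulus (bits_to_field_space input_bits modulus)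

-- ===== LEMMAS AND PROOFS =====

-- value of a bit list, least-significant bit first
def pvBitsVal (l : List Int) : Int :=
  l.foldr (fun b acc => (if b ≠ 0 then 1 else 0) + 2 * acc) 0

theorem pv_fmod_mul_left (m a b : Int) : ((a.fmod m) * b).fmod m = (a * b).fmod m := by
  rw [Int.mul_fmod, Int.fmod_fmod, ← Int.mul_fmod]

theorem pv_fmod_add_mul (m a b c : Int) : ((a.fmod m) + (b.fmod m) * c).fmod m = (a + b * c).fmod m := by
  rw [Int.add_fmod, Int.fmod_fmod, pv_fmod_mul_left, ← Int.add_fmod]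

theorem pv_fmod_mul_add (m a c : Int) : ((a.fmod m) * 2 + c).fmod m = (a * 2 + c).fmod m := by
  rw [Int.add_fmod, pv_fmod_mul_left, ← Int.add_fmod]

theorem pvA_loop (m : Int) : ∀ (l : List Int) (mult val : Int), val.fmod m = val →
    (l.foldl
      (fun st bit =>
        (PySem.Int.mod (st.1 + st.1) m,
         if bit ≠ 0 then PySem.Int.mod (st.2 + st.1) m else st.2))
      (mult, val)).2 = (val + mult * pvBitsVal l).fmod m := by
  intro l
  induction l with
  | nil => intro mult val hval; simpa [pvBitsVal] using hval.symm
  | cons b t ih =>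
    intro mult val hval
    simp only [List.foldl_cons]
    by_cases hb : b ≠ 0
    · rw [if_pos hb,
        ih (PySem.Int.mod (mult + mult) m) (PySem.Int.mod (val + mult) m) (Int.fmod_fmod (val + mult) m)]
      simp only [PySem.Int.mod]
      rw [Int.add_fmod, Int.fmod_fmod, pv_fmod_mul_left, ← Int.add_fmod]
      simp only [pvBitsVal, List.foldr_cons, if_pos hb]
      congr 1; ring
    · rw [if_neg hb, ih (PySem.Int.mod (mult + mult) m) val hval]
      simp only [PySem.Int.mod]
      rw [← hval, pv_fmod_add_mul, hval]
      simp only [pvBitsVal, List.foldr_cons, if_neg hb]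
      congr 1; ring

theorem pvB_loop (m : Int) : ∀ (l : List Int) (v : Int), v.fmod m = v →
    l.foldr (fun bit acc => PySem.Int.mod (acc * 2 + (if bit ≠ 0 then 1 else 0)) m) v
      = (v * 2 ^ l.length + pvBitsVal l).fmod m := by
  intro l
  induction l with
  | nil => intro v hv; simpa [pvBitsVal] using hv.symm
  | cons b t ih =>
    intro v hv
    simp only [List.foldr_cons]
    rw [ih v hv]
    simp only [PySem.Int.mod, pv_fmod_mul_add]
    simp only [pvBitsVal, List.foldr_cons, List.length_cons]
    congr 1; rw [pow_succ]; ring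

-- ===== VERDICT (by name: the statement is the Claim_ definition above) =====
theorem bits_to_field_space_spec : Claim_equal_bits_to_field_space := by
  intro l m _ _
  unfold Spec_bits_to_field_space bits_to_field_space bits_to_field_space_alt
  rw [List.foldl_reverse]
  have h0 : (PySem.Int.mod 0 m).fmod m = PySem.Int.mod 0 m := Int.fmod_fmod 0 m
  rw [pvA_loop m l (PySem.Int.mod 1 m) (PySem.Int.mod 0 m) h0]
  rw [pvB_loop m l (PySem.Int.mod 0 m) h0]
  simp only [PySem.Int.mod, Int.zero_fmod, zero_add, zero_mul]
  rw [pv_fmod_mul_left, one_mul]
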